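-- pv_equiv track=rewrite | github.com/Sergitxin22/Prog1 | 2. Exámenes segundo parcial/curso 2022-23/Examen Pablo/solucion_examen_pablo.py | usuario_mas_prestamos
-- ===== SOURCE A (Python) =====
-- def num_prestamos_por_usuario(lista_prestamos):
--     num_prestamos_usuarios = {}
--
--     for usuario in lista_prestamos:
--         prestamos_usuario = lista_prestamos[usuario]
--         num_prestamos_usuario = len(prestamos_usuario)
--
--         num_prestamos_usuarios[usuario] = num_prestamos_usuario
--
--     return num_prestamos_usuarios
--
-- def usuario_mas_prestamos(lista_prestamos):
--     mayor_num_prestamos = 0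
--     usuario_mas_prestamos = ''
--     num_prestamos_usuarios = num_prestamos_por_usuario(lista_prestamos)
--
--     for usuario in num_prestamos_usuarios:
--         num_prestamos_usuario = num_prestamos_usuarios[usuario]
--
--         if num_prestamos_usuario > mayor_num_prestamos:
--             mayor_num_prestamos = num_prestamos_usuario
--             usuario_mas_prestamos = usuario
--
--     return usuario_mas_prestamos
-- ===== SOURCE B (Python) =====
-- def usuario_mas_prestamos(lista_prestamos):
--     mayor = max((len(prestamos) for prestamos in lista_prestamos.values()), default=0)
--     if mayor == 0:
--         return ''
--     return next(usuario for usuario, prestamos in lista_prestamos.items()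
--                 if len(prestamos) == mayor)
-- ===== Notes on version B (the rewrite author's own statement) =====
-- stated objective: idiomatic
-- what changed: B replaces A's helper + counts dict + running-maximum loop by two staged passes: first compute the maximum loan count with max(..., default=0), then return the first user attaining it (or '' when the maximum is 0).
import Mathlib
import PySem

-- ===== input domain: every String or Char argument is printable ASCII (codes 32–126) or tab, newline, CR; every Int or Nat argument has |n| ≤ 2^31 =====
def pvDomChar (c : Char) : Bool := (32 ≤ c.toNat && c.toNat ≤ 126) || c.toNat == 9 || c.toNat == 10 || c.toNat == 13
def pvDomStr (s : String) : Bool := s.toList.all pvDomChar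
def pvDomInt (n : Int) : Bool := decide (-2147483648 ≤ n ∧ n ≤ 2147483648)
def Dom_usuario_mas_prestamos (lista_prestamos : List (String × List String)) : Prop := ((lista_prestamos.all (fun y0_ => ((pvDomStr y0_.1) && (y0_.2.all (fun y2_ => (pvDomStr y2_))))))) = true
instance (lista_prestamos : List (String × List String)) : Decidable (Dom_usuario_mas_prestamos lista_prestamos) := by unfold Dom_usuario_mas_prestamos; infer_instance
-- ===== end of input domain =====

-- B replaces A's helper + counts dict + running-maximum loop by two staged passes
-- (compute the maximum count, then find the first user attaining it); objective: idiomatic.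

-- ===== PORT A =====
-- helper num_prestamos_por_usuario: builds the dict {usuario: len(prestamos)}.
-- 'for usuario in lista_prestamos' iterates the dict's keys; 'lista_prestamos[usuario]'
-- is a lookup that always hits (the key comes from the dict itself), so getD is exact.
def num_prestamos_por_usuario (lista_prestamos : List (String × List String)) : PySem.Dict String Int :=
  (lista_prestamos.map Prod.fst).foldl
    (fun d usuario =>
      d.insert usuario (((PySem.Dict.mk lista_prestamos).getD usuario []).length : Int))
    PySem.Dict.empty

def usuario_mas_prestamos (lista_prestamos : List (String × List String)) : String :=
  let num_prestamos_usuarios := num_prestamos_por_usuario lista_prestamos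
  -- second loop: for usuario in num_prestamos_usuarios (its keys), lookup always hits
  (num_prestamos_usuarios.keys.foldl
    (fun (st : Int × String) usuario =>
      let n := num_prestamos_usuarios.getD usuario 0
      if n > st.1 then (n, usuario) else st)
    ((0 : Int), "")).2

-- ===== PORT B =====
def usuario_mas_prestamos_alt (lista_prestamos : List (String × List String)) : String :=
  -- mayor = max((len(prestamos) for ...), default=0)
  let mayor : Int :=
    (PySem.List.max? (lista_prestamos.map (fun p => ((p.2.length : Int)))) (fun x => x)).getD 0
  if mayor == 0 then ""
  else
    -- next(usuario for usuario, prestamos in ... if len(prestamos) == mayor):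
    -- always hits because mayor > 0 is attained; getD "" is unreachable
    ((lista_prestamos.find? (fun p => (p.2.length : Int) == mayor)).map Prod.fst).getD ""

-- ===== PRECONDITION & SPEC =====
-- Pre_ excludes association lists with duplicate keys: the Python argument is a dict,
-- which cannot contain a duplicate key, so nothing A returns on is excluded.
def Pre_usuario_mas_prestamos (lista_prestamos : List (String × List String)) : Prop :=
  (lista_prestamos.map Prod.fst).Nodup
instance (lista_prestamos : List (String × List String)) : Decidable (Pre_usuario_mas_prestamos lista_prestamos) := by unfold Pre_usuario_mas_prestamos; infer_instance

def pvWitness_usuario_mas_prestamos : (List (String × List String)) :=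
  [("ana", ["l1", "l2"]), ("bea", ["l3"])]

def Spec_usuario_mas_prestamos (lista_prestamos : List (String × List String)) (out : String) : Prop := out = usuario_mas_prestamos_alt lista_prestamos
instance (lista_prestamos : List (String × List String)) (out : String) : Decidable (Spec_usuario_mas_prestamos lista_prestamos out) := by unfold Spec_usuario_mas_prestamos; infer_instance

-- ===== CLAIM (what is proved, stated in full; the proofs are below) =====
def Claim_equal_usuario_mas_prestamos : Prop := ∀ (lista_prestamos : List (String × List String)), Dom_usuario_mas_prestamos lista_prestamos → Pre_usuario_mas_prestamos lista_prestamos → Spec_usuario_mas_prestamos lista_prestamos (usuario_mas_prestamos lista_prestamos)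

-- ===== LEMMAS AND PROOFS =====

-- the counts dict built by A's helper is exactly the input list with lengths as values
theorem counts_items (l : List (String × List String)) (h : (l.map Prod.fst).Nodup) :
    (num_prestamos_por_usuario l).items = l.map (fun p => (p.1, (p.2.length : Int))) := by
  have h2 : (num_prestamos_por_usuario l).items
      = PySem.Dict.empty.items
        ++ (l.map Prod.fst).map (fun u => (u, (((PySem.Dict.mk l).getD u []).length : Int))) :=
    PySem.Dict.items_foldl_insert_fresh (l := l.map Prod.fst) (k := fun (u : String) => u)
      (v := fun u => (((PySem.Dict.mk l).getD u []).length : Int)) (d := PySem.Dict.empty)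
      (fun a _ => PySem.Dict.contains_empty a) (by simpa using h)
  rw [h2]
  simp only [show (PySem.Dict.empty : PySem.Dict String Int).items = [] from rfl, List.nil_append,
    List.map_map]
  refine List.map_congr_left (fun p hp => ?_)
  have hget : (PySem.Dict.mk l).getD p.1 [] = p.2 :=
    PySem.Dict.getD_of_mem_items _ (by simpa [PySem.Dict.items] using hp)
      (by simpa [PySem.Dict.keys, PySem.Dict.items] using h) []
  simp [hget]

theorem counts_keys (l : List (String × List String)) (h : (l.map Prod.fst).Nodup) :
    (num_prestamos_por_usuario l).keys = l.map Prod.fst := by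
  simp [PySem.Dict.keys, counts_items l h, List.map_map, Function.comp]

-- folding over a dict's keys with getD equals folding over its items
theorem foldl_keys_getD (d : PySem.Dict String Int) (h : d.keys.Nodup) (init : Int × String) :
    d.keys.foldl
      (fun (st : Int × String) u => if d.getD u 0 > st.1 then (d.getD u 0, u) else st) init
    = d.items.foldl
      (fun (st : Int × String) p => if p.2 > st.1 then (p.2, p.1) else st) init := by
  rw [PySem.Dict.items_eq_map_keys d h 0, List.foldl_map]

-- a running max that strictly exceeds its seed is attained by some element
theorem foldl_max_attained (l : List (String × List String)) : ∀ (a : Int),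
    (∃ p ∈ l, (p.2.length : Int) = l.foldl (fun b p => max b (p.2.length : Int)) a)
    ∨ l.foldl (fun b p => max b (p.2.length : Int)) a = a := by
  induction l with
  | nil => intro a; exact Or.inr rfl
  | cons p t ih =>
    intro a
    rcases ih (max a (p.2.length : Int)) with ⟨q, hq, hval⟩ | heq
    · exact Or.inl ⟨q, List.mem_cons_of_mem _ hq, by simpa using hval⟩
    · by_cases h : a ≤ (p.2.length : Int)
      · refine Or.inl ⟨p, List.mem_cons_self, ?_⟩
        rw [max_eq_right h] at heq
        rw [List.foldl_cons, max_eq_right h]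
        exact heq.symm
      · refine Or.inr ?_
        rw [max_eq_left (le_of_not_ge h)] at heq
        rw [List.foldl_cons, max_eq_left (le_of_not_ge h)]
        exact heq

-- characterisation of A's running-maximum loop: the overall max, paired with the
-- first element attaining it (the accumulator if nothing exceeds the seed)
theorem fold_char (l : List (String × List String)) : ∀ (m : Int) (u : String),
    l.foldl (fun (st : Int × String) p =>
        if (p.2.length : Int) > st.1 then ((p.2.length : Int), p.1) else st) (m, u)
    = (l.foldl (fun b p => max b (p.2.length : Int)) m,
       if l.foldl (fun b p => max b (p.2.length : Int)) m ≤ m then u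
       else ((l.find? (fun p =>
               (p.2.length : Int) == l.foldl (fun b p => max b (p.2.length : Int)) m)).map
             Prod.fst).getD u) := by
  induction l with
  | nil => intro m u; simp
  | cons p t ih =>
    intro m u
    simp only [List.foldl_cons]
    by_cases h : (p.2.length : Int) > m
    · have hmax : max m (p.2.length : Int) = (p.2.length : Int) := max_eq_right (le_of_lt h)
      have hM := (PySem.List.le_foldl_max_int t (fun p => (p.2.length : Int))
        (p.2.length : Int)).1
      rw [if_pos h, hmax, ih]
      refine Prod.ext rfl ?_
      have hMm : ¬ t.foldl (fun b p => max b (p.2.length : Int)) (p.2.length : Int) ≤ m := by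
        omega
      rw [if_neg hMm]
      by_cases h2 : t.foldl (fun b p => max b (p.2.length : Int)) (p.2.length : Int)
          ≤ (p.2.length : Int)
      · have heq : t.foldl (fun b p => max b (p.2.length : Int)) (p.2.length : Int)
            = (p.2.length : Int) := le_antisymm h2 hM
        rw [if_pos h2, List.find?_cons_of_pos (by simp [heq])]
        simp
      · rw [if_neg h2, List.find?_cons_of_neg (by simp; omega)]
        rcases foldl_max_attained t (p.2.length : Int) with ⟨q, hq, hval⟩ | heq
        · have hfind : (List.find?
              (fun q2 => ((q2.2.length : Int)
                == List.foldl (fun b r => max b (r.2.length : Int)) (p.2.length : Int) t)) t).isSome :=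
            List.find?_isSome.mpr ⟨q, hq, by simpa using hval⟩
          obtain ⟨v, hv⟩ := Option.isSome_iff_exists.mp hfind
          rw [hv]; rfl
        · omega
    · have hmax : max m (p.2.length : Int) = m := max_eq_left (by omega)
      have hM := (PySem.List.le_foldl_max_int t (fun p => (p.2.length : Int)) m).1
      rw [if_neg h, hmax, ih]
      refine Prod.ext rfl ?_
      by_cases h2 : t.foldl (fun b p => max b (p.2.length : Int)) m ≤ m
      · rw [if_pos h2, if_pos h2]
      · rw [if_neg h2, if_neg h2, List.find?_cons_of_neg (by simp; omega)]

-- ===== VERDICT (by name: the statement is the Claim_ definition above) =====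
theorem usuario_mas_prestamos_spec : Claim_equal_usuario_mas_prestamos := by
  intro l _ hpre
  have hk : (num_prestamos_por_usuario l).keys.Nodup := by rw [counts_keys l hpre]; exact hpre
  unfold Spec_usuario_mas_prestamos
  simp only [usuario_mas_prestamos, usuario_mas_prestamos_alt]
  rw [foldl_keys_getD _ hk, counts_items l hpre, List.foldl_map]
  rw [fold_char l 0 ""]
  -- identify B's 'mayor' with A's running maximum, then compare the two branchings
  have hM0 := (PySem.List.le_foldl_max_int l (fun p => (p.2.length : Int)) 0).1
  have hmayor :
      (PySem.List.max? (l.map (fun p => ((p.2.length : Int)))) (fun x => x)).getD 0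
      = l.foldl (fun b p => max b (p.2.length : Int)) 0 := by
    cases l with
    | nil => simp [PySem.List.max?]
    | cons p t =>
      have h0 : (0 : Int) ≤ (p.2.length : Int) := by positivity
      rw [List.map_cons, PySem.List.max?_id_cons]
      simp only [Option.getD_some, List.foldl_cons, max_eq_right h0, List.foldl_map]
  rw [hmayor]
  by_cases h2 : l.foldl (fun b p => max b (p.2.length : Int)) 0 ≤ 0
  · have heq0 : l.foldl (fun b p => max b (p.2.length : Int)) 0 = 0 := le_antisymm h2 hM0
    simp [heq0]
  · have hne : (l.foldl (fun b p => max b (p.2.length : Int)) 0 == 0) = false := by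
      simp; omega
    simp [if_neg h2, hne]
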